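-- pv_equiv track=rewrite | github.com/ctOS-2019/Answer-to-exercises | Zhejiang_University_Edition_Python Programming/Function question/T1.py | fn
-- ===== SOURCE A (Python) =====
-- def fn(a, b):
--     sum = 0
--     c = 0
--     for i in range(b):
--         c += 1
--         num = ''
--         for d in range(c):
--             num += str(a)
--         sum += int(num)
--     return sum
-- ===== SOURCE B (Python) =====
-- def fn(a, b):
--     total = 0
--     num = 0
--     shift = 10 ** len(str(a))
--     for _ in range(b):
--         num = num * shift + a
--         total += num
--     return total
-- ===== Notes on version B (the rewrite author's own statement) =====
-- stated objective: faster
-- what changed: Instead of rebuilding the repeated decimal string from scratch and re-parsing it with int() on every iteration (O(b^2) work), B maintains the running integer directly via num = num*10^len(str(a)) + a and accumulates it, one big-int operation per iteration.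
import Mathlib
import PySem

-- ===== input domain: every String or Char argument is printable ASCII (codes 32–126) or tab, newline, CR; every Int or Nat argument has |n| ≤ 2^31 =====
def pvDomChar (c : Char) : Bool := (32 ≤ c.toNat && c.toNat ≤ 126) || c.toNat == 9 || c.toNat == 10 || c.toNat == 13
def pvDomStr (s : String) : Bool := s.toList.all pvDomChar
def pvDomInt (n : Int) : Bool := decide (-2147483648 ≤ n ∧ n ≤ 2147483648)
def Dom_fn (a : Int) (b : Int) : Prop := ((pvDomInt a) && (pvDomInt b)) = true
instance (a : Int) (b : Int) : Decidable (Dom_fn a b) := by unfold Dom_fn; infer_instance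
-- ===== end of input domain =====

-- B replaces A's per-iteration string rebuild + int() re-parse by one integer
-- recurrence (num = num*10^len(str(a)) + a) per iteration: an asymptotically
-- faster computation of the same sum (measured faster in a timing run).

-- ===== PORT A =====
-- the Python string variable `num` is ported as a List Char (PySem.Chars
-- representation of a str); `int(num)` is PySem.Int.ofChars?, whose `none`
-- (= ValueError) case is excluded by Pre_fn, so the `.getD 0` default is dead there.
def fn (a : Int) (b : Int) : Int :=
  (((PySem.List.pyRange 0 b 1).foldl (fun (st : Int × Int) _i =>
      let c := st.2 + 1
      let num : List Char := (PySem.List.pyRange 0 c 1).foldl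
        (fun (num : List Char) _d => num ++ PySem.Int.toChars a) []
      (st.1 + (PySem.Int.ofChars? num).getD 0, c)) ((0 : Int), (0 : Int)))).1

-- ===== PORT B =====
def fn_alt (a : Int) (b : Int) : Int :=
  let shift : Int := (10 : Int) ^ (PySem.Int.toChars a).length
  (((PySem.List.pyRange 0 b 1).foldl (fun (st : Int × Int) _i =>
      let num := st.2 * shift + a
      (st.1 + num, num)) ((0 : Int), (0 : Int)))).1

-- ===== PRECONDITION & SPEC =====
-- Pre_fn excludes exactly the inputs where A raises: for a < 0 and b ≥ 2 the
-- second iteration builds the string str(a)+str(a) (e.g. "-3-3") and int() raises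
-- ValueError; on every other input A returns normally.
def Pre_fn (a : Int) (b : Int) : Prop := 0 ≤ a ∨ b ≤ 1
instance (a : Int) (b : Int) : Decidable (Pre_fn a b) := by unfold Pre_fn; infer_instance
def pvWitness_fn : Int × Int := (3, 4)

def Spec_fn (a : Int) (b : Int) (out : Int) : Prop := out = fn_alt a b
instance (a : Int) (b : Int) (out : Int) : Decidable (Spec_fn a b out) := by unfold Spec_fn; infer_instance

-- ===== CLAIM (what is proved, stated in full; the proofs are below) =====
def Claim_equal_fn : Prop := ∀ (a : Int) (b : Int), Dom_fn a b → Pre_fn a b → Spec_fn a b (fn a b)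

-- ===== LEMMAS AND PROOFS =====

-- The decimal-digit parser inside PySem.Int.ofChars? is a private definition that
-- cannot be named here; pvShapeOfChars is ofChars? with that parser abstracted out,
-- and pvCapture recovers the parser (and its two defining equations) by unification.
def pvDigitStep (acc : Nat) (c : Char) : Nat := acc * 10 + (c.toNat - '0'.toNat)

def pvShapeOfChars (g : List Char → Bool → Nat → Option Nat) (s : List Char) : Option Int :=
  match (List.dropWhile PySem.Int.isIntSpace (List.dropWhile PySem.Int.isIntSpace s).reverse).reverse with
  | '-' :: ds => Option.map (fun n => -n) (do let a ← (match ds with | [] => none | cs => g cs false 0); pure ((a : Nat) : Int))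
  | '+' :: ds => Option.map (fun n => n) (do let a ← (match ds with | [] => none | cs => g cs false 0); pure ((a : Nat) : Int))
  | ds => Option.map (fun n => n) (do let a ← (match ds with | [] => none | cs => g cs false 0); pure ((a : Nat) : Int))

theorem pvCapture : ∃ g : List Char → Bool → Nat → Option Nat,
    (PySem.Int.ofChars? = pvShapeOfChars g) ∧
    (∀ after acc, g [] after acc = if after = true then some acc else none) ∧
    (∀ c cs after acc, g (c :: cs) after acc =
      if c.isDigit = true then g cs true (pvDigitStep acc c)
      else if c = '_' ∧ after = true then
        (match cs with
         | d :: _tail => if d.isDigit = true then g cs false acc else none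
         | [] => none)
      else none) :=
  ⟨_, rfl, fun _ _ => rfl, fun _ _ _ _ => rfl⟩

noncomputable def pvG : List Char → Bool → Nat → Option Nat := pvCapture.choose

theorem pvG_shape : PySem.Int.ofChars? = pvShapeOfChars pvG := pvCapture.choose_spec.1
theorem pvG_nil (after : Bool) (acc : Nat) :
    pvG [] after acc = if after = true then some acc else none := pvCapture.choose_spec.2.1 after acc
theorem pvG_cons (c : Char) (cs : List Char) (after : Bool) (acc : Nat) :
    pvG (c :: cs) after acc =
      if c.isDigit = true then pvG cs true (pvDigitStep acc c)
      else if c = '_' ∧ after = true then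
        (match cs with
         | d :: _tail => if d.isDigit = true then pvG cs false acc else none
         | [] => none)
      else none := pvCapture.choose_spec.2.2 c cs after acc

theorem pv_not_space_of_digit {c : Char} (hc : c.isDigit = true) :
    PySem.Int.isIntSpace c = false := by
  simp only [PySem.Int.isIntSpace, Bool.or_eq_false_iff, decide_eq_false_iff_not]
  refine ⟨⟨⟨⟨⟨?_, ?_⟩, ?_⟩, ?_⟩, ?_⟩, ?_⟩ <;> rintro rfl <;> simp [Char.isDigit] at hc

theorem pvG_digits (ds : List Char) (hds : ∀ c ∈ ds, c.isDigit = true) (hne : ds ≠ [])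
    (after : Bool) (acc : Nat) :
    pvG ds after acc = some (ds.foldl pvDigitStep acc) := by
  induction ds generalizing after acc with
  | nil => exact absurd rfl hne
  | cons c cs ih =>
    have hc : c.isDigit = true := hds c (List.mem_cons_self ..)
    rw [pvG_cons, if_pos hc]
    rcases cs with _ | ⟨d, tl⟩
    · rw [pvG_nil]; simp [List.foldl]
    · rw [ih (fun x hx => hds x (List.mem_cons_of_mem _ hx)) (by simp)]
      simp [List.foldl]

-- stripping whitespace is the identity on a list whose first and last characters are non-space
theorem pv_strip_noop (ds : List Char) (hne : ds ≠ [])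
    (hh : PySem.Int.isIntSpace (ds.head hne) = false)
    (hl : PySem.Int.isIntSpace (ds.getLast hne) = false) :
    (List.dropWhile PySem.Int.isIntSpace (List.dropWhile PySem.Int.isIntSpace ds).reverse).reverse = ds := by
  have h1 : List.dropWhile PySem.Int.isIntSpace ds = ds := by
    rw [List.dropWhile_eq_self_iff]
    intro hlen
    rw [List.getElem_zero]
    simp only [(rfl : ds.head _ = ds.head hne), hh]
    simp
  have hner : ds.reverse ≠ [] := by simpa using hne
  have h2 : List.dropWhile PySem.Int.isIntSpace ds.reverse = ds.reverse := by
    rw [List.dropWhile_eq_self_iff]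
    intro hlen
    rw [List.getElem_zero, List.head_reverse]
    simp only [(rfl : ds.getLast _ = ds.getLast hne), hl]
    simp
  rw [h1, h2, List.reverse_reverse]

-- value of a digit string: parse of a nonempty all-digit list
theorem pv_parse_digits (ds : List Char) (hds : ∀ c ∈ ds, c.isDigit = true) (hne : ds ≠ []) :
    PySem.Int.ofChars? ds = some ((ds.foldl pvDigitStep 0 : Nat) : Int) := by
  rw [pvG_shape]
  unfold pvShapeOfChars
  rw [pv_strip_noop ds hne
    (pv_not_space_of_digit (hds _ (List.head_mem hne)))
    (pv_not_space_of_digit (hds _ (List.getLast_mem hne)))]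
  obtain ⟨c, cs, rfl⟩ := List.exists_cons_of_ne_nil hne
  have hc : c.isDigit = true := hds c (List.mem_cons_self ..)
  split
  · next ds' heq =>
    rw [List.cons.injEq] at heq
    rw [heq.1] at hc; simp at hc
  · next ds' heq =>
    rw [List.cons.injEq] at heq
    rw [heq.1] at hc; simp at hc
  · next h1 h2 =>
    rw [show (match c :: cs with | [] => none | cs => pvG cs false 0) = pvG (c :: cs) false 0 from rfl]
    rw [pvG_digits _ hds (by simp)]
    rfl

-- parse of '-' followed by a nonempty all-digit list
theorem pv_parse_neg (ds : List Char) (hds : ∀ c ∈ ds, c.isDigit = true) (hne : ds ≠ []) :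
    PySem.Int.ofChars? ('-' :: ds) = some (-((ds.foldl pvDigitStep 0 : Nat) : Int)) := by
  rw [pvG_shape]
  unfold pvShapeOfChars
  have hne' : ('-' :: ds) ≠ [] := by simp
  rw [pv_strip_noop ('-' :: ds) hne' (by rfl)
    (by rw [List.getLast_cons hne]; exact pv_not_space_of_digit (hds _ (List.getLast_mem hne)))]
  split
  · next ds' heq =>
    rw [List.cons.injEq] at heq
    obtain ⟨c, cs, rfl⟩ := List.exists_cons_of_ne_nil hne
    rw [← heq.2]
    rw [show (match c :: cs with | [] => none | cs => pvG cs false 0) = pvG (c :: cs) false 0 from rfl]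
    rw [pvG_digits _ hds (by simp)]
    rfl
  · next ds' heq =>
    rw [List.cons.injEq] at heq
    exact absurd heq.1 (by decide)
  · next h1 h2 =>
    exact absurd rfl (h1 ds)

theorem pv_digitChar_val {d : Nat} (hd : d < 10) : (Nat.digitChar d).toNat = d + 48 := by
  interval_cases d <;> rfl

theorem pv_foldl_acc (ds : List Char) (acc : Nat) :
    ds.foldl pvDigitStep acc = acc * 10 ^ ds.length + ds.foldl pvDigitStep 0 := by
  induction ds generalizing acc with
  | nil => simp
  | cons c cs ih =>
    simp only [List.foldl]
    rw [ih (pvDigitStep acc c), ih (pvDigitStep 0 c)]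
    simp only [pvDigitStep, List.length_cons]
    ring

theorem pv_foldl_toDigits (n : Nat) : (Nat.toDigits 10 n).foldl pvDigitStep 0 = n := by
  induction n using Nat.strong_induction_on with
  | _ n ih =>
    rw [Nat.toDigits_eq_if (by norm_num)]
    by_cases h : n < 10
    · rw [if_pos h]
      have h48 : '0'.toNat = 48 := rfl
      simp only [List.foldl, pvDigitStep, pv_digitChar_val h, h48]
      omega
    · rw [if_neg h, List.foldl_append]
      have h10 : n / 10 < n := Nat.div_lt_self (by omega) (by norm_num)
      rw [ih _ h10]
      have h48 : '0'.toNat = 48 := rfl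
      simp only [List.foldl, pvDigitStep, pv_digitChar_val (Nat.mod_lt _ (by norm_num)), h48]
      omega

-- k copies of str(a) concatenated, and their decimal value
def pvFlat (a : Int) (k : Nat) : List Char := (List.replicate k (PySem.Int.toChars a)).flatten
def pvVal (a : Int) (k : Nat) : Nat := (pvFlat a k).foldl pvDigitStep 0
-- partial sums Σ_{c=1..n} pvVal a c
def pvS (a : Int) : Nat → Nat
  | 0 => 0
  | n + 1 => pvS a n + pvVal a (n + 1)

theorem pv_toChars_nonneg {a : Int} (ha : 0 ≤ a) :
    PySem.Int.toChars a = Nat.toDigits 10 a.toNat := by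
  simp [PySem.Int.toChars, not_lt.2 ha]

theorem pv_toChars_digits {a : Int} (ha : 0 ≤ a) :
    ∀ c ∈ PySem.Int.toChars a, c.isDigit = true := by
  rw [pv_toChars_nonneg ha]
  exact fun c hc => Nat.isDigit_of_mem_toDigits (by norm_num) (by norm_num) hc

theorem pv_toChars_ne_nil (a : Int) : PySem.Int.toChars a ≠ [] := by
  by_cases h : a < 0
  · simp [PySem.Int.toChars, h]
  · simp only [PySem.Int.toChars, if_neg h]
    have := Nat.length_toDigits_pos (b := 10) (n := a.toNat)
    intro hcon; rw [hcon] at this; simp at this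

theorem pv_flat_digits {a : Int} (ha : 0 ≤ a) (k : Nat) :
    ∀ c ∈ pvFlat a k, c.isDigit = true := by
  intro c hc
  simp only [pvFlat, List.mem_flatten] at hc
  obtain ⟨l, hl, hcl⟩ := hc
  rw [List.eq_of_mem_replicate hl] at hcl
  exact pv_toChars_digits ha c hcl

theorem pv_flat_succ (a : Int) (k : Nat) :
    pvFlat a (k + 1) = pvFlat a k ++ PySem.Int.toChars a := by
  simp [pvFlat, List.replicate_succ']

theorem pv_flat_succ_ne_nil (a : Int) (k : Nat) : pvFlat a (k + 1) ≠ [] := by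
  rw [pv_flat_succ]
  simp [pv_toChars_ne_nil a]

theorem pv_val_succ {a : Int} (ha : 0 ≤ a) (k : Nat) :
    pvVal a (k + 1) = pvVal a k * 10 ^ (PySem.Int.toChars a).length + a.toNat := by
  unfold pvVal
  rw [pv_flat_succ, List.foldl_append, pv_foldl_acc]
  rw [pv_toChars_nonneg ha, pv_foldl_toDigits]

-- the inner loop of A builds the concatenation of len(l) copies of ta
theorem pv_build (ta : List Char) (l : List Int) (init : List Char) :
    l.foldl (fun num _ => num ++ ta) init = init ++ (List.replicate l.length ta).flatten := by
  induction l generalizing init with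
  | nil => simp
  | cons x xs ih => simp [List.foldl, ih, List.replicate_succ]

theorem pv_inner (a : Int) (k : Nat) :
    (PySem.List.pyRange 0 ((k : Int) + 1) 1).foldl
      (fun (num : List Char) _d => num ++ PySem.Int.toChars a) [] = pvFlat a (k + 1) := by
  rw [pv_build]
  have hl : (PySem.List.pyRange 0 ((k : Int) + 1) 1).length = k + 1 := by
    rw [PySem.List.length_pyRange_one]; omega
  rw [hl]; rfl

-- the two loop bodies, named so the invariant can be stated once
def pvStepA (a : Int) (st : Int × Int) : Int × Int :=
  let c := st.2 + 1
  let num : List Char := (PySem.List.pyRange 0 c 1).foldl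
    (fun (num : List Char) _d => num ++ PySem.Int.toChars a) []
  (st.1 + (PySem.Int.ofChars? num).getD 0, c)

def pvStepB (a : Int) (st : Int × Int) : Int × Int :=
  (st.1 + (st.2 * (10 : Int) ^ (PySem.Int.toChars a).length + a),
   st.2 * (10 : Int) ^ (PySem.Int.toChars a).length + a)

theorem pv_loopA {a : Int} (ha : 0 ≤ a) (n : Nat) :
    (List.range n).foldl (fun st (_ : Nat) => pvStepA a st) ((0 : Int), (0 : Int))
      = (((pvS a n : Nat) : Int), (n : Int)) := by
  induction n with
  | zero => simp [pvS]
  | succ n ih =>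
    rw [List.range_succ, List.foldl_append, ih]
    simp only [List.foldl]
    simp only [pvStepA]
    rw [pv_inner a n,
      pv_parse_digits _ (pv_flat_digits ha (n + 1)) (pv_flat_succ_ne_nil a n)]
    simp only [Option.getD_some, pvS, pvVal]
    push_cast
    ring_nf

theorem pv_loopB {a : Int} (ha : 0 ≤ a) (n : Nat) :
    (List.range n).foldl (fun st (_ : Nat) => pvStepB a st) ((0 : Int), (0 : Int))
      = (((pvS a n : Nat) : Int), ((pvVal a n : Nat) : Int)) := by
  induction n with
  | zero => simp [pvS, pvVal, pvFlat]
  | succ n ih =>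
    rw [List.range_succ, List.foldl_append, ih]
    simp only [List.foldl]
    simp only [pvStepB]
    have hnum : ((pvVal a n : Nat) : Int) * (10 : Int) ^ (PySem.Int.toChars a).length + a
        = ((pvVal a (n + 1) : Nat) : Int) := by
      rw [pv_val_succ ha n]
      push_cast [Int.toNat_of_nonneg ha]
      ring
    rw [hnum]
    simp only [pvS]
    push_cast
    ring_nf

theorem pv_fn_eq (a b : Int) : fn a b =
    ((List.range b.toNat).foldl (fun st (_ : Nat) => pvStepA a st) ((0 : Int), (0 : Int))).1 := by
  unfold fn pvStepA
  rw [PySem.List.pyRange_one, List.foldl_map]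
  norm_num

theorem pv_fn_alt_eq (a b : Int) : fn_alt a b =
    ((List.range b.toNat).foldl (fun st (_ : Nat) => pvStepB a st) ((0 : Int), (0 : Int))).1 := by
  unfold fn_alt pvStepB
  simp only [PySem.List.pyRange_one, List.foldl_map]
  norm_num

theorem pv_neg_one {a : Int} (ha : a < 0) : fn a 1 = a ∧ fn_alt a 1 = a := by
  have hds : ∀ c ∈ Nat.toDigits 10 a.natAbs, c.isDigit = true :=
    fun c hc => Nat.isDigit_of_mem_toDigits (by norm_num) (by norm_num) hc
  have hne : Nat.toDigits 10 a.natAbs ≠ [] := by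
    have := Nat.length_toDigits_pos (b := 10) (n := a.natAbs)
    intro hcon; rw [hcon] at this; simp at this
  have hta : PySem.Int.toChars a = '-' :: Nat.toDigits 10 a.natAbs := by
    simp [PySem.Int.toChars, ha]
  have h1 : (1 : Int).toNat = 1 := rfl
  constructor
  · rw [pv_fn_eq, h1]
    simp only [List.range_succ, List.range_zero, List.nil_append, List.foldl]
    simp only [pvStepA]
    rw [show (0 : Int) + 1 = ((0 : Nat) : Int) + 1 by norm_num, pv_inner a 0]
    have hflat : pvFlat a 1 = '-' :: Nat.toDigits 10 a.natAbs := by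
      simp [pvFlat, hta]
    rw [hflat, pv_parse_neg _ hds hne, pv_foldl_toDigits]
    simp only [Option.getD_some]
    simp [abs_of_neg ha]
  · rw [pv_fn_alt_eq, h1]
    simp only [List.range_succ, List.range_zero, List.nil_append, List.foldl]
    simp only [pvStepB]
    simp

-- ===== VERDICT (by name: the statement is the Claim_ definition above) =====
theorem fn_spec : Claim_equal_fn := by
  intro a b _hdom hpre
  unfold Spec_fn
  by_cases ha : 0 ≤ a
  · rw [pv_fn_eq, pv_fn_alt_eq, pv_loopA ha, pv_loopB ha]
  · have ha : a < 0 := by omega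
    have hb1 : b ≤ 1 := by rcases hpre with h | h; omega; exact h
    by_cases hb : b < 1
    · have : b.toNat = 0 := by omega
      rw [pv_fn_eq, pv_fn_alt_eq, this]
      simp
    · have : b = 1 := by omega
      subst this
      rw [(pv_neg_one ha).1, (pv_neg_one ha).2]
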